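-- pv_equiv track=rewrite | github.com/vgraeber/hofstracs | csc15/classwork/graeber_twosComp.py | toTwosComp
-- ===== SOURCE A (Python) =====
-- def toBin(n):
--   binN = []
--   while (n != 0):
--     binN.append(n % 2)
--     n //= 2
--   binN.reverse()
--   binN.insert(0, 0)
--   return binN
--
-- def toTwosComp(n):
--   twosCompN = toBin(abs(n))
--   for i in range(len(twosCompN)):
--     if (twosCompN[i] == 1):
--       twosCompN[i] = 0
--     else:
--       twosCompN[i] = 1
--   added = False
--   i = -1
--   while (not added):
--     if (twosCompN[i] == 1):
--       twosCompN[i] = 0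
--       i -= 1
--     else:
--       twosCompN[i] = 1
--       added = True
--   return twosCompN
-- ===== SOURCE B (Python) =====
-- def toBin(n):
--   binN = []
--   while (n != 0):
--     binN.append(n % 2)
--     n //= 2
--   binN.reverse()
--   binN.insert(0, 0)
--   return binN
--
-- def toTwosComp(n):
--   bits = toBin(abs(n))
--   i = len(bits) - 1
--   while bits[i] == 0:
--     i -= 1
--   return [1 - b for b in bits[:i]] + bits[i:]
-- ===== Notes on version B (the rewrite author's own statement) =====
-- stated objective: alternative
-- what changed: B replaces A's two in-place passes (flip every bit, then propagate a +1 carry right-to-left with negative indices) by the standard shortcut: scan for the rightmost set bit of toBin(abs(n)) and invert only the bits strictly to its left, keeping that bit and everything right of it unchanged.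
-- outside the precondition, e.g. on toTwosComp(0): A raises IndexError, B raises IndexError
import Mathlib
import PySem

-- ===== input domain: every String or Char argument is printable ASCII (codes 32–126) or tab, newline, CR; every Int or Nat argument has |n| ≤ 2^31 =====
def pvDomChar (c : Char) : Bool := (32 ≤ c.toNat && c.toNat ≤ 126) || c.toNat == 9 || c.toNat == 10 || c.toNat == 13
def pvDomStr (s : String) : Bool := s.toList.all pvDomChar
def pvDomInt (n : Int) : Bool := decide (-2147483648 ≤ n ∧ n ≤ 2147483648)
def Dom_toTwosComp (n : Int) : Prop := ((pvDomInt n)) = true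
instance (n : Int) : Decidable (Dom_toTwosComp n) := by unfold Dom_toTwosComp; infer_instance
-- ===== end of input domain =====

-- B inverts only the bits left of the rightmost set bit instead of A's flip-all-then-add-one carry loop.
-- Both raise IndexError on n = 0 (excluded by Pre_). Equivalence is about the return value.

-- ===== PORT A =====
-- termination helper, cited by the loop's decreasing_by
theorem pvHalf_lt (n : Int) (h : 0 < n) : (PySem.Int.floordiv n 2).toNat < n.toNat := by
  rw [PySem.Int.floordiv_eq_ediv_of_pos (by omega)]; omega

-- Python's `while n != 0` loop of toBin; toBin is only ever called with abs(n) ≥ 0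
-- (on n < 0 Python diverges; this port returns acc there — unreachable from toTwosComp)
def pvToBinLoop (n : Int) (acc : List Int) : List Int :=
  if h : 0 < n then pvToBinLoop (PySem.Int.floordiv n 2) (acc ++ [PySem.Int.mod n 2])
  else acc
termination_by n.toNat
decreasing_by exact pvHalf_lt n h

-- toBin: loop, reverse, insert 0 at front
def pvToBin (n : Int) : List Int := 0 :: (pvToBinLoop n []).reverse

-- A's carry `while not added` loop, walking from the right (ported on the reversed list);
-- [] is where Python's negative index runs off the front (IndexError, excluded by Pre_)
def pvCarry : List Int → List Int
  | [] => []
  | b :: rest => if b = 1 then 0 :: pvCarry rest else 1 :: rest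

def toTwosComp (n : Int) : List Int :=
  let t := (pvToBin (n.natAbs : Int)).map (fun b => if b = 1 then (0 : Int) else 1)
  (pvCarry t.reverse).reverse

-- ===== PORT B =====
-- B's downward scan `while bits[i] == 0`, ported on the reversed list;
-- [] is where Python's scan runs off the front (IndexError, excluded by Pre_)
def pvScanZeros : List Int → Nat
  | [] => 0
  | b :: rest => if b = 0 then pvScanZeros rest + 1 else 0

def toTwosComp_alt (n : Int) : List Int :=
  let bits := pvToBin (n.natAbs : Int)
  let i : Int := (bits.length : Int) - 1 - (pvScanZeros bits.reverse : Int)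
  (PySem.List.slice bits none (some i)).map (fun b => 1 - b) ++ PySem.List.slice bits (some i) none

-- ===== PRECONDITION & SPEC =====
-- Pre_ excludes exactly n = 0, where A's carry loop (and B's scan) run off the front: IndexError.
def Pre_toTwosComp (n : Int) : Prop := n ≠ 0
instance (n : Int) : Decidable (Pre_toTwosComp n) := by unfold Pre_toTwosComp; infer_instance
def pvWitness_toTwosComp : Int := 5

def Spec_toTwosComp (n : Int) (out : List Int) : Prop := out = toTwosComp_alt n
instance (n : Int) (out : List Int) : Decidable (Spec_toTwosComp n out) := by unfold Spec_toTwosComp; infer_instance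

-- ===== CLAIM (what is proved, stated in full; the proofs are below) =====
def Claim_equal_toTwosComp : Prop := ∀ (n : Int), Dom_toTwosComp n → Pre_toTwosComp n → Spec_toTwosComp n (toTwosComp n)

-- ===== LEMMAS AND PROOFS =====

-- accumulator lemma for the toBin loop
theorem pvToBinLoop_acc : ∀ (k : Nat) (n : Int), n.toNat ≤ k → ∀ acc,
    pvToBinLoop n acc = acc ++ pvToBinLoop n [] := by
  intro k
  induction k with
  | zero =>
    intro n hn acc
    have h0 : ¬ 0 < n := by omega
    conv_lhs => rw [pvToBinLoop]
    conv_rhs => rw [pvToBinLoop]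
    simp [h0]
  | succ k ih =>
    intro n hn acc
    conv_lhs => rw [pvToBinLoop]
    conv_rhs => rw [pvToBinLoop]
    by_cases h : 0 < n
    · simp only [h, dif_pos]
      have hk : (PySem.Int.floordiv n 2).toNat ≤ k := by
        have := pvHalf_lt n h; omega
      rw [ih _ hk, ih _ hk (acc := [] ++ [PySem.Int.mod n 2])]
      simp
    · simp [h]

-- every element the loop produces is a bit
theorem pvToBinLoop_mem : ∀ (k : Nat) (n : Int) (acc : List Int), n.toNat ≤ k →
    (∀ b ∈ acc, b = 0 ∨ b = 1) → ∀ b ∈ pvToBinLoop n acc, b = 0 ∨ b = 1 := by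
  intro k
  induction k with
  | zero =>
    intro n acc hn hacc
    have h0 : ¬ 0 < n := by omega
    rw [pvToBinLoop]
    simpa [h0] using hacc
  | succ k ih =>
    intro n acc hn hacc
    rw [pvToBinLoop]
    by_cases h : 0 < n
    · simp only [h, dif_pos]
      have hk : (PySem.Int.floordiv n 2).toNat ≤ k := by
        have := pvHalf_lt n h; omega
      refine ih _ _ hk ?_
      intro b hb
      rcases List.mem_append.1 hb with h1 | h1
      · exact hacc _ h1
      · have hmod : PySem.Int.mod n 2 = n % 2 := PySem.Int.mod_eq_emod_of_pos (by omega)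
        simp only [List.mem_singleton] at h1
        subst h1
        rw [hmod]
        omega
    · simpa [h] using hacc

-- structure of the digit list: trailing zeros, then a 1, then more digits
theorem pvToBinLoop_structure : ∀ (k : Nat) (n : Int), n.toNat ≤ k → 0 < n →
    ∃ j rest, pvToBinLoop n [] = List.replicate j (0 : Int) ++ 1 :: rest := by
  intro k
  induction k with
  | zero => intro n hn h; omega
  | succ k ih =>
    intro n hn h
    rw [pvToBinLoop]
    simp only [h, dif_pos]
    have hk : (PySem.Int.floordiv n 2).toNat ≤ k := by have := pvHalf_lt n h; omega
    rw [pvToBinLoop_acc k _ hk]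
    have hmod : PySem.Int.mod n 2 = n % 2 := PySem.Int.mod_eq_emod_of_pos (by omega)
    have hdiv : PySem.Int.floordiv n 2 = n / 2 := PySem.Int.floordiv_eq_ediv_of_pos (by omega)
    by_cases hodd : n % 2 = 1
    · exact ⟨0, pvToBinLoop (PySem.Int.floordiv n 2) [], by simp [hodd]⟩
    · have hmod0 : n % 2 = 0 := by omega
      have hpos : 0 < PySem.Int.floordiv n 2 := by rw [hdiv]; omega
      obtain ⟨j, rest, heq⟩ := ih _ hk hpos
      refine ⟨j + 1, rest, ?_⟩
      rw [heq]
      simp [hmod0, List.replicate_succ]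

-- A's carry loop turns a block of ones into zeros and flips the next bit
theorem pvCarry_ones (j : Nat) (rest : List Int) :
    pvCarry (List.replicate j (1 : Int) ++ 0 :: rest) = List.replicate j (0 : Int) ++ 1 :: rest := by
  induction j with
  | zero => simp [pvCarry]
  | succ j ih => simp [List.replicate_succ, pvCarry, ih]

-- B's scan counts the zero block
theorem pvScanZeros_replicate (j : Nat) (rest : List Int) :
    pvScanZeros (List.replicate j (0 : Int) ++ 1 :: rest) = j := by
  induction j with
  | zero => simp [pvScanZeros]
  | succ j ih => simp [List.replicate_succ, pvScanZeros, ih]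

theorem toTwosComp_main (n : Int) (h : n ≠ 0) : toTwosComp n = toTwosComp_alt n := by
  have hpos : 0 < (n.natAbs : Int) := by
    have : n.natAbs ≠ 0 := Int.natAbs_ne_zero.mpr h
    omega
  obtain ⟨j, rest, heq⟩ :=
    pvToBinLoop_structure (n.natAbs : Int).toNat _ le_rfl hpos
  have hd : ∀ b ∈ pvToBinLoop (n.natAbs : Int) [], b = 0 ∨ b = 1 :=
    pvToBinLoop_mem _ _ [] le_rfl (by simp)
  set rest' : List Int := rest ++ [0] with hrest'
  have hd' : ∀ b ∈ rest', b = 0 ∨ b = 1 := by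
    intro b hb
    rcases List.mem_append.1 hb with h1 | h1
    · exact hd b (by rw [heq]; simp [h1])
    · left; simpa using h1
  have hrev : (pvToBin (n.natAbs : Int)).reverse = List.replicate j (0 : Int) ++ 1 :: rest' := by
    show ((0 : Int) :: (pvToBinLoop (n.natAbs : Int) []).reverse).reverse = _
    rw [heq, hrest']
    simp
  have hbits : pvToBin (n.natAbs : Int) = rest'.reverse ++ 1 :: List.replicate j (0 : Int) := by
    have := congrArg List.reverse hrev
    simpa [List.reverse_append] using this
  -- A's value
  have hA : toTwosComp n
      = (rest'.map (fun b => if b = 1 then (0 : Int) else 1)).reverse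
        ++ 1 :: List.replicate j (0 : Int) := by
    simp only [toTwosComp]
    rw [← List.map_reverse, hrev]
    have hmap : (List.replicate j (0 : Int) ++ 1 :: rest').map
        (fun b => if b = 1 then (0 : Int) else 1)
        = List.replicate j (1 : Int) ++ 0 :: rest'.map (fun b => if b = 1 then (0 : Int) else 1) := by
      simp
    rw [hmap, pvCarry_ones]
    simp [List.reverse_append]
  -- B's value
  have hscan : pvScanZeros (pvToBin (n.natAbs : Int)).reverse = j := by
    rw [hrev]; exact pvScanZeros_replicate j rest'
  have hlen : (pvToBin (n.natAbs : Int)).length = rest'.length + 1 + j := by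
    rw [hbits]; simp; omega
  have hi : ((pvToBin (n.natAbs : Int)).length : Int) - 1
      - (pvScanZeros (pvToBin (n.natAbs : Int)).reverse : Int) = (rest'.length : Int) := by
    rw [hscan, hlen]; push_cast; ring
  simp only [toTwosComp_alt]
  rw [hi, PySem.List.slice_to_natCast, PySem.List.slice_from_natCast, hbits]
  rw [List.take_left' (by simp), List.drop_left' (by simp)]
  rw [hA, ← List.map_reverse]
  congr 1
  apply List.map_congr_left
  intro b hb
  rcases hd' b (by simpa using hb) with hb | hb <;> simp [hb]

-- ===== VERDICT (by name: the statement is the Claim_ definition above) =====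
theorem toTwosComp_spec : Claim_equal_toTwosComp := by
  intro n _ hpre
  exact toTwosComp_main n hpre
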